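-- pv_equiv track=rewrite | github.com/marcoswca/algorithms | RUMO9S.py | isMultipleOf9
-- ===== SOURCE A (Python) =====
-- def isMultipleOf9(number, level):
--     if(len(str(number)) == 1 and number != 9):
--         return False, level
--     elif (number == 9):
--         if(level == 0):
--             return True, 1
--         else:
--             return True, level
--     else:
--         new_number = 0
--         for n in str(number):
--             new_number += int(n)
--         return isMultipleOf9(new_number, level + 1)
-- ===== SOURCE B (Python) =====
-- def isMultipleOf9(number, level):
--     # Iterative digital root: arithmetic digit sums via divmod, no recursion, no string conversion.
--     while number >= 10:
--         s = 0
--         n = number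
--         while n > 0:
--             n, d = divmod(n, 10)
--             s += d
--         number = s
--         level += 1
--     if number == 9:
--         return True, 1 if level == 0 else level
--     return False, level
-- ===== Notes on version B (the rewrite author's own statement) =====
-- stated objective: alternative
-- what changed: Replaces the recursion over per-character int() parsing of str(number) with an iterative while-loop that computes each digit sum arithmetically via divmod, avoiding recursion and string conversion entirely.
import Mathlib
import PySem

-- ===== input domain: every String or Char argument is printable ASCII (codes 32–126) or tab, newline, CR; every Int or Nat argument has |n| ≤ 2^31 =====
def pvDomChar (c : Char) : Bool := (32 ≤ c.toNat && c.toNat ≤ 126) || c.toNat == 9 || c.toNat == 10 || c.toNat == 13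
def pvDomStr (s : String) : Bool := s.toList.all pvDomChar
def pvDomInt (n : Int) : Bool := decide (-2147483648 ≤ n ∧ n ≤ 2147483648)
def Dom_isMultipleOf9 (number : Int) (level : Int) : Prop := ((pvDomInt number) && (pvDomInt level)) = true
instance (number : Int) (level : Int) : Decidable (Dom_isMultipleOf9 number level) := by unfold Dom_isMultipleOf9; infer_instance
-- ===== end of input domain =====

-- B replaces A's recursion over per-character int() parsing of str(number) by an iterative loop with
-- arithmetic (divmod) digit sums; equivalence is proved on number ≥ 0 (A raises ValueError on negatives).

-- ===== PORT A =====
-- A-side helper: the loop 'new_number = 0; for n in str(number): new_number += int(n)'.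
-- Python raises ValueError when int(n) fails (the '-' of a negative number): none models that.
def aStrSum : List Char → Int → Option Int
  | [], acc => some acc
  | c :: cs, acc =>
    match PySem.Int.ofChars? [c] with
    | none => none
    | some d => aStrSum cs (acc + d)

-- A's recursion, with a fuel counter as totality guard only (number.toNat + 1 rounds always suffice,
-- since each digit sum of a number ≥ 10 is strictly smaller; the fuel-0 branch is never reached)
def aGo (fuel : Nat) (number : Int) (level : Int) : Bool × Int :=
  match fuel with
  | 0 => (false, level)
  | fuel + 1 =>
    if (PySem.Int.toChars number).length = 1 ∧ number ≠ 9 then (false, level)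
    else if number = 9 then
      (if level = 0 then (true, 1) else (true, level))
    else
      match aStrSum (PySem.Int.toChars number) 0 with
      | none => (false, level)  -- Python raises ValueError here (negative number); excluded by Pre_
      | some newNumber => aGo fuel newNumber (level + 1)

def isMultipleOf9 (number : Int) (level : Int) : Bool × Int :=
  aGo (number.toNat + 1) number level

-- ===== PORT B =====
-- B-side helper: the inner 'while n > 0: n, d = divmod(n, 10); s += d'
-- (fuel is a totality guard only: n.toNat + 1 iterations always suffice)
def bDigitSumGo (fuel : Nat) (n : Int) (s : Int) : Int :=
  match fuel with
  | 0 => s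
  | fuel + 1 =>
    if 0 < n then bDigitSumGo fuel (PySem.Int.floordiv n 10) (s + PySem.Int.mod n 10) else s

def bDigitSum (n : Int) : Int := bDigitSumGo (n.toNat + 1) n 0

-- the outer 'while number >= 10' loop followed by the final check (same fuel guard)
def bLoopGo (fuel : Nat) (number : Int) (level : Int) : Bool × Int :=
  match fuel with
  | 0 => (false, level)
  | fuel + 1 =>
    if 10 ≤ number then bLoopGo fuel (bDigitSum number) (level + 1)
    else if number = 9 then (true, if level = 0 then 1 else level)
    else (false, level)

def isMultipleOf9_alt (number : Int) (level : Int) : Bool × Int :=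
  bLoopGo (number.toNat + 1) number level

-- ===== PRECONDITION & SPEC =====
-- Pre_ excludes number < 0, on which A raises ValueError (int('-') while summing the characters of str(number)).
def Pre_isMultipleOf9 (number : Int) (level : Int) : Prop := 0 ≤ number
instance (number : Int) (level : Int) : Decidable (Pre_isMultipleOf9 number level) := by
  unfold Pre_isMultipleOf9; infer_instance

def pvWitness_isMultipleOf9 : Int × Int := (18, 0)

def Spec_isMultipleOf9 (number : Int) (level : Int) (out : Bool × Int) : Prop :=
  out = isMultipleOf9_alt number level
instance (number : Int) (level : Int) (out : Bool × Int) :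
    Decidable (Spec_isMultipleOf9 number level out) := by unfold Spec_isMultipleOf9; infer_instance

-- ===== CLAIM (what is proved, stated in full; the proofs are below) =====
def Claim_equal_isMultipleOf9 : Prop := ∀ (number : Int) (level : Int),
  Dom_isMultipleOf9 number level → Pre_isMultipleOf9 number level →
  Spec_isMultipleOf9 number level (isMultipleOf9 number level)

-- ===== LEMMAS AND PROOFS =====

-- the decimal digit list of a Nat, most significant first ('0' for 0), used to reason about str(n)
def decChars (n : Nat) : List Nat := if n = 0 then [0] else (Nat.digits 10 n).reverse

theorem toDigitsCore_eq_decChars (f : Nat) : ∀ (n : Nat) (l : List Char), n < f →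
    Nat.toDigitsCore 10 f n l = (decChars n).map Nat.digitChar ++ l := by
  induction f with
  | zero => intro n l h; omega
  | succ f ih =>
    intro n l h
    by_cases h10 : n / 10 = 0
    · have hn : n < 10 := by omega
      simp only [Nat.toDigitsCore, h10, if_pos]
      by_cases h0 : n = 0
      · subst h0; simp [decChars]
      · have : Nat.digits 10 n = [n] := by
          rw [Nat.digits_def' (by norm_num) (by omega)]
          simp [Nat.mod_eq_of_lt hn, Nat.div_eq_of_lt hn]
        simp [decChars, h0, this, Nat.mod_eq_of_lt hn]
    · have hn : 10 ≤ n := by omega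
      simp only [Nat.toDigitsCore, h10]
      rw [ih (n / 10) _ (by omega)]
      have hdig : Nat.digits 10 n = n % 10 :: Nat.digits 10 (n / 10) :=
        Nat.digits_def' (by norm_num) (by omega)
      simp [decChars, h10, hdig, show n ≠ 0 by omega]

theorem toChars_natCast (n : Nat) :
    PySem.Int.toChars (n : Int) = (decChars n).map Nat.digitChar := by
  simp only [PySem.Int.toChars]
  rw [if_neg (by omega)]
  have : (n : Int).toNat = n := by omega
  rw [this, Nat.toDigits, toDigitsCore_eq_decChars (n + 1) n [] (by omega), List.append_nil]

theorem decChars_lt (n : Nat) : ∀ d ∈ decChars n, d < 10 := by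
  intro d hd
  by_cases h0 : n = 0
  · simp [decChars, h0] at hd; omega
  · simp only [decChars, h0, if_false, List.mem_reverse] at hd
    exact Nat.digits_lt_base (by norm_num) hd

theorem ofChars?_digitChar (d : Nat) (h : d < 10) :
    PySem.Int.ofChars? [Nat.digitChar d] = some (d : Int) := by
  interval_cases d <;> decide

theorem aStrSum_map_digitChar : ∀ (ds : List Nat) (acc : Int), (∀ d ∈ ds, d < 10) →
    aStrSum (ds.map Nat.digitChar) acc = some (acc + (ds.sum : Int)) := by
  intro ds
  induction ds with
  | nil => intro acc _; simp [aStrSum]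
  | cons d ds ih =>
    intro acc h
    simp only [List.map_cons, aStrSum, ofChars?_digitChar d (h d (by simp))]
    rw [ih (acc + d) (fun x hx => h x (by simp [hx]))]
    simp only [List.sum_cons]
    push_cast
    ring_nf

theorem aStrSum_toChars (n : Nat) :
    aStrSum (PySem.Int.toChars (n : Int)) 0 = some ((decChars n).sum : Int) := by
  rw [toChars_natCast, aStrSum_map_digitChar (decChars n) 0 (decChars_lt n)]
  simp

theorem decChars_length_eq_one_iff (n : Nat) : (decChars n).length = 1 ↔ n < 10 := by
  by_cases h0 : n = 0
  · simp [decChars, h0]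
  · have h2 : (Nat.digits 10 n).length ≤ 1 ↔ n < 10 := by
      simpa using Nat.digits_length_le_iff (b := 10) (k := 1) (by norm_num) n
    have hne : Nat.digits 10 n ≠ [] := Nat.digits_ne_nil_iff_ne_zero.mpr h0
    have h1 : 1 ≤ (Nat.digits 10 n).length := List.length_pos_iff.mpr hne
    simp only [decChars, h0, if_false, List.length_reverse]
    omega

theorem decChars_sum_lt (n : Nat) (h : 10 ≤ n) : (decChars n).sum < n := by
  have hdig : Nat.digits 10 n = n % 10 :: Nat.digits 10 (n / 10) :=
    Nat.digits_def' (by norm_num) (by omega)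
  have hle : (Nat.digits 10 (n / 10)).sum ≤ n / 10 := Nat.digit_sum_le 10 (n / 10)
  have hmod : n % 10 + 10 * (n / 10) = n := Nat.mod_add_div n 10
  simp only [decChars, show n ≠ 0 by omega, if_false, List.sum_reverse, hdig, List.sum_cons]
  omega

theorem bDigitSumGo_natCast : ∀ (fuel : Nat) (k : Nat) (s : Int), k < fuel →
    bDigitSumGo fuel (k : Int) s = s + ((Nat.digits 10 k).sum : Int) := by
  intro fuel
  induction fuel with
  | zero => intro k s h; omega
  | succ fuel ih =>
    intro k s h
    by_cases h0 : k = 0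
    · subst h0; simp [bDigitSumGo]
    · have hk : 0 < k := by omega
      rw [bDigitSumGo, if_pos (show (0:Int) < (k:Int) by omega)]
      rw [PySem.Int.floordiv_eq_ediv_of_pos (by norm_num), PySem.Int.mod_eq_emod_of_pos (by norm_num)]
      have hdiv : (k : Int) / 10 = ((k / 10 : Nat) : Int) := by omega
      have hmod : (k : Int) % 10 = ((k % 10 : Nat) : Int) := by omega
      rw [hdiv, hmod, ih (k / 10) _ (by omega),
        show Nat.digits 10 k = k % 10 :: Nat.digits 10 (k / 10) from Nat.digits_def' (by norm_num) hk]
      simp only [List.sum_cons]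
      push_cast
      ring

theorem decChars_sum_eq (k : Nat) : (decChars k).sum = (Nat.digits 10 k).sum := by
  by_cases h0 : k = 0
  · simp [decChars, h0]
  · simp [decChars, h0, List.sum_reverse]

theorem bDigitSum_natCast (k : Nat) : bDigitSum (k : Int) = ((decChars k).sum : Int) := by
  unfold bDigitSum
  rw [show ((k : Int).toNat + 1) = k + 1 by omega,
    bDigitSumGo_natCast (k + 1) k 0 (by omega), decChars_sum_eq]
  simp

theorem main_equiv : ∀ (fuel : Nat) (k : Nat) (level : Int), k < fuel →
    aGo fuel (k : Int) level = bLoopGo fuel (k : Int) level := by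
  intro fuel
  induction fuel with
  | zero => intro k level h; omega
  | succ fuel ih =>
    intro k level hk
    by_cases h10 : k < 10
    · -- single decimal digit: both sides finish without another digit-sum round
      have hlen : (PySem.Int.toChars (k : Int)).length = 1 := by
        rw [toChars_natCast]; simpa using (decChars_length_eq_one_iff k).mpr h10
      by_cases h9 : k = 9
      · subst h9
        have hA : ¬ ((PySem.Int.toChars ((9:Nat) : Int)).length = 1 ∧ ((9:Nat) : Int) ≠ 9) := by
          simp
        rw [aGo, bLoopGo, if_neg hA, if_pos (show ((9:Nat):Int) = 9 by norm_num),
          if_neg (show ¬ (10:Int) ≤ ((9:Nat):Int) by norm_num),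
          if_pos (show ((9:Nat):Int) = 9 by norm_num)]
        split_ifs <;> rfl
      · rw [aGo, bLoopGo]
        rw [if_pos ⟨hlen, by omega⟩, if_neg (by omega), if_neg (by omega)]
    · -- k ≥ 10: one digit-sum round on each side, then the induction hypothesis
      have hk10 : 10 ≤ k := by omega
      have hsum2 := decChars_sum_lt k hk10
      have hlen : ¬ ((PySem.Int.toChars (k : Int)).length = 1 ∧ (k : Int) ≠ 9) := by
        rw [toChars_natCast]
        intro hcon
        have := (decChars_length_eq_one_iff k).mp (by simpa using hcon.1)
        omega
      rw [aGo, bLoopGo]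
      rw [if_neg hlen, if_neg (by omega), if_pos (by omega : (10:Int) ≤ (k:Int))]
      rw [bDigitSum_natCast k]
      have hsum := aStrSum_toChars k
      split
      · rename_i hnone
        rw [hsum] at hnone
        exact absurd hnone (by simp)
      · rename_i m hm
        rw [hsum] at hm
        rw [(Option.some_inj.mp hm).symm]
        exact ih (decChars k).sum (level + 1) (by omega)

-- ===== VERDICT (by name: the statement is the Claim_ definition above) =====
theorem isMultipleOf9_spec : Claim_equal_isMultipleOf9 := by
  intro number level _hdom hpre
  unfold Pre_isMultipleOf9 at hpre
  unfold Spec_isMultipleOf9 isMultipleOf9 isMultipleOf9_alt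
  obtain ⟨k, rfl⟩ : ∃ k : Nat, number = (k : Int) := ⟨number.toNat, by omega⟩
  rw [show ((k : Int).toNat + 1) = k + 1 by omega]
  exact main_equiv (k + 1) k level (by omega)
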